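-- pv_equiv track=rewrite | github.com/viswaamitcodes/Become_coder_python | count_max_sort_arr.py | max_sort
-- ===== SOURCE A (Python) =====
-- def max_sort(n,data):
--     arr_len=c=0
--     for i in range(n-1):
--         c+=1
--         if data[i]>data[i+1] :
--             if arr_len<c :
--                 arr_len=c
--             c=0
--     if c>arr_len:
--         arr_len=c+1
--     return arr_len
-- ===== SOURCE B (Python) =====
-- def max_sort(n, data):
--     # Descent-position algorithm: collect the indices where the array descends,
--     # then the longest nondecreasing run of data[:n] is the largest gap between
--     # consecutive descent positions (with sentinels -1 and n-1).
--     breaks = [i for i in range(n - 1) if data[i] > data[i + 1]]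
--     breaks.append(n - 1)
--     best = 0
--     prev = -1
--     for b in breaks:
--         gap = b - prev
--         if gap > best:
--             best = gap
--         prev = b
--     return best
-- ===== Notes on version B (the rewrite author's own statement) =====
-- stated objective: alternative
-- what changed: A's fused streak-counter/max scan is replaced by a descent-position algorithm: collect the indices where data[i] > data[i+1], append the sentinel n-1, and return the largest gap between consecutive descent positions (starting from -1); B also fixes A's undercount on the final run and on single-element input.
-- intended difference: When n = 1, or when the trailing nondecreasing run of data[:n] is exactly one element longer than the longest earlier run, A undercounts (it returns 0 for a single element and forgets the final +1, e.g. max_sort(5,[1,2,0,1,2]) = 2) while B returns the true longest-nondecreasing-run length (3 there), which is the intended value. — e.g. on max_sort(5, [1, 2, 0, 1, 2]): A returns 2, B returns 3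
import Mathlib
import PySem

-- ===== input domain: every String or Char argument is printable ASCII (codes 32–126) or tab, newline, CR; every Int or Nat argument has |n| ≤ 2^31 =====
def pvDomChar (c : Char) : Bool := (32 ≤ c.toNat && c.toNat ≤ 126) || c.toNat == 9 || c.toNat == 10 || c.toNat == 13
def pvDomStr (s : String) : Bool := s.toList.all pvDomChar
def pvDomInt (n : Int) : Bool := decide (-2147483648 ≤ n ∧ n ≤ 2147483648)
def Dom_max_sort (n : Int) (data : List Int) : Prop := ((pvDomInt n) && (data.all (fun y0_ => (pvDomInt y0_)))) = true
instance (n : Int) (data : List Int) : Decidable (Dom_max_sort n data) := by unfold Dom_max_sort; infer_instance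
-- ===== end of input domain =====

-- B replaces A's fused streak-counter/max scan by a descent-position algorithm (collect the
-- indices where the array descends, then take the largest gap between consecutive descents);
-- B also fixes A's undercount on the final run and on single-element input (stated in D_ below).


-- ===== PORT A =====
def max_sort (n : Int) (data : List Int) : Int :=
  let st := (PySem.List.pyRange 0 (n-1) 1).foldl
    (fun (s : Int × Int) (i : Int) =>
      let c := s.2 + 1
      if PySem.List.pyGetD data i 0 > PySem.List.pyGetD data (i+1) 0 then
        (if s.1 < c then c else s.1, 0)
      else (s.1, c))
    (0, 0)
  if st.2 > st.1 then st.2 + 1 else st.1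

-- ===== PORT B =====
def max_sort_alt (n : Int) (data : List Int) : Int :=
  ((((PySem.List.pyRange 0 (n-1) 1).filter
      (fun i => PySem.List.pyGetD data i 0 > PySem.List.pyGetD data (i+1) 0)) ++ [n - 1]).foldl
    (fun (s : Int × Int) (b : Int) => (if b - s.2 > s.1 then b - s.2 else s.1, b))
    (0, -1)).1

-- ===== PRECONDITION & SPEC =====
-- Pre_ excludes exactly the inputs where A (and B) raise IndexError: n ≥ 2 with n > len(data).
def Pre_max_sort (n : Int) (data : List Int) : Prop := n ≤ (data.length : Int) ∨ n < 2
instance (n : Int) (data : List Int) : Decidable (Pre_max_sort n data) := by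
  unfold Pre_max_sort; infer_instance

def pvWitness_max_sort : Int × List Int := (3, [1, 2, 3])

-- When n = 1, or when the trailing nondecreasing run of data[:n] is exactly one element longer
-- than the longest earlier run, A undercounts (0 for a single element; the earlier-run length
-- otherwise) while B returns the true longest-nondecreasing-run length, the intended value.
def D_max_sort (n : Int) (data : List Int) : Prop :=
  n = 1 ∨
  (let c := ((data.take n.toNat).splitBy (fun a b => decide (a ≤ b))).map List.length
   2 ≤ c.length ∧ c.getLast?.getD 0 = c.dropLast.foldr max 0 + 1)
instance (n : Int) (data : List Int) : Decidable (D_max_sort n data) := by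
  unfold D_max_sort; infer_instance

def Spec_max_sort (n : Int) (data : List Int) (out : Int) : Prop :=
  ¬ D_max_sort n data → out = max_sort_alt n data
instance (n : Int) (data : List Int) (out : Int) : Decidable (Spec_max_sort n data out) := by
  unfold Spec_max_sort; infer_instance

def pvDiffWitness_max_sort : Int × List Int := (5, [1, 2, 0, 1, 2])
def pvDiffWitnessOut_max_sort : Int × Int := (2, 3)

-- ===== CLAIM (what is proved, stated in full; the proofs are below) =====
def Claim_unchanged_max_sort : Prop := ∀ (n : Int) (data : List Int), Dom_max_sort n data → Pre_max_sort n data → Spec_max_sort n data (max_sort n data)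
def Claim_changed_max_sort : Prop := Dom_max_sort (pvDiffWitness_max_sort.1) (pvDiffWitness_max_sort.2) ∧ Pre_max_sort (pvDiffWitness_max_sort.1) (pvDiffWitness_max_sort.2) ∧ D_max_sort (pvDiffWitness_max_sort.1) (pvDiffWitness_max_sort.2) ∧ max_sort (pvDiffWitness_max_sort.1) (pvDiffWitness_max_sort.2) = pvDiffWitnessOut_max_sort.1 ∧ max_sort_alt (pvDiffWitness_max_sort.1) (pvDiffWitness_max_sort.2) = pvDiffWitnessOut_max_sort.2 ∧ pvDiffWitnessOut_max_sort.1 ≠ pvDiffWitnessOut_max_sort.2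
def Claim_exact_max_sort : Prop := ∀ (n : Int) (data : List Int), Dom_max_sort n data → Pre_max_sort n data → D_max_sort n data → max_sort n data ≠ max_sort_alt n data

-- ===== LEMMAS AND PROOFS =====

-- proof-side helpers: the comparison table, its trailing-true-run length and A's running max
def cmpT : List Int → List Bool
  | a :: b :: r => decide (a ≤ b) :: cmpT (b :: r)
  | _ => []

def leadT : List Bool → Int
  | [] => 0
  | true :: r => leadT r + 1
  | false :: _ => 0

def mAr : List Bool → Int
  | [] => 0
  | true :: r => mAr r
  | false :: r => max (mAr r) (leadT r + 1)

-- positions (from offset k) of the false entries of a boolean list: B's descent indices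
def fPos : List Bool → Int → List Int
  | [], _ => []
  | b :: r, k => if b then fPos r (k+1) else k :: fPos r (k+1)

-- A's loop body, as a function of the comparison boolean
def stepA (s : Int × Int) (x : Bool) : Int × Int :=
  if x then (s.1, s.2 + 1) else (if s.1 < s.2 + 1 then s.2 + 1 else s.1, 0)

-- B's gap-loop body
def stepG (s : Int × Int) (b : Int) : Int × Int :=
  (if b - s.2 > s.1 then b - s.2 else s.1, b)

theorem mAr_eq_zero (l : List Bool) (h : false ∉ l) : mAr l = 0 := by
  induction l with
  | nil => rfl
  | cons x r ih =>
    cases x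
    · simp at h
    · simp only [mAr]
      exact ih (fun hr => h (List.mem_cons_of_mem _ hr))

theorem leadT_nonneg (l : List Bool) : 0 ≤ leadT l := by
  induction l with
  | nil => simp [leadT]
  | cons x r ih =>
    cases x
    · simp [leadT]
    · simp only [leadT]
      omega

theorem leadT_le_length (l : List Bool) : leadT l ≤ (l.length : Int) := by
  induction l with
  | nil => simp [leadT]
  | cons x r ih =>
    cases x
    · simp only [leadT, List.length_cons]
      push_cast
      have := leadT_nonneg r
      omega
    · simp only [leadT, List.length_cons]
      push_cast
      omega

theorem leadT_snoc (l : List Bool) (x : Bool) :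
    leadT ((l ++ [x]).reverse) = if x then leadT l.reverse + 1 else 0 := by
  cases x <;> simp [List.reverse_append, leadT]

theorem mAr_snoc (l : List Bool) (x : Bool) :
    mAr ((l ++ [x]).reverse) =
      if x then mAr l.reverse else max (mAr l.reverse) (leadT l.reverse + 1) := by
  cases x <;> simp [List.reverse_append, mAr]

theorem fPos_snoc (l : List Bool) (x : Bool) (k : Int) :
    fPos (l ++ [x]) k = fPos l k ++ (if x then [] else [k + (l.length : Int)]) := by
  induction l generalizing k with
  | nil => cases x <;> simp [fPos]
  | cons b r ih =>
    have e : k + 1 + (r.length : Int) = k + ((r.length + 1 : Nat) : Int) := by push_cast; ring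
    rw [List.cons_append]
    cases b <;> cases x <;> simp [fPos, ih (k+1), e]

-- the invariant of A's loop over the comparison list
theorem inv (l : List Bool) :
    l.foldl stepA (0, 0) = (mAr l.reverse, leadT l.reverse) ∧
    0 ≤ mAr l.reverse ∧
    (false ∈ l ↔ 1 ≤ mAr l.reverse) ∧
    (l ≠ [] → false ∈ l ∨ 1 ≤ leadT l.reverse) := by
  induction l using List.reverseRecOn with
  | nil => simp [leadT, mAr]
  | append_singleton l x ih =>
    obtain ⟨hA, hm, hf, hne⟩ := ih
    have ht0 := leadT_nonneg l.reverse
    refine ⟨?_, ?_, ?_, ?_⟩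
    · rw [List.foldl_append, List.foldl_cons, List.foldl_nil, hA, leadT_snoc, mAr_snoc]
      cases x
      · simp only [stepA, Bool.false_eq_true, if_false]
        rw [Prod.ext_iff]
        exact ⟨by dsimp only; split <;> omega, rfl⟩
      · simp [stepA]
    · rw [mAr_snoc]
      cases x
      · simp only [Bool.false_eq_true, if_false]; omega
      · simpa using hm
    · rw [mAr_snoc]
      cases x
      · simp only [Bool.false_eq_true, if_false, List.mem_append, List.mem_singleton]
        constructor
        · intro _; omega
        · intro _; simp
      · simp only [if_true, List.mem_append]
        rw [← hf]; simp
    · intro _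
      rw [leadT_snoc]
      cases x
      · simp
      · exact Or.inr (by simp; omega)

-- the invariant of B's gap loop over the descent positions
theorem invB (l : List Bool) :
    (fPos l 0).foldl stepG (0, -1) =
      (mAr l.reverse, (l.length : Int) - leadT l.reverse - 1) := by
  induction l using List.reverseRecOn with
  | nil => simp [fPos, leadT, mAr]
  | append_singleton l x ih =>
    have hle := leadT_le_length l.reverse
    have ht0 := leadT_nonneg l.reverse
    rw [fPos_snoc]
    cases x with
    | true =>
      simp only [if_true, List.append_nil, ih, mAr_snoc, leadT_snoc, List.length_append,
        List.length_cons, List.length_nil]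
      rw [Prod.ext_iff]
      refine ⟨rfl, ?_⟩
      push_cast
      omega
    | false =>
      simp only [Bool.false_eq_true, if_false, List.foldl_append, List.foldl_cons,
        List.foldl_nil, ih, mAr_snoc, leadT_snoc, List.length_append, List.length_cons,
        List.length_nil, stepG]
      rw [List.length_reverse] at hle
      rw [Prod.ext_iff]
      constructor
      · have hgap : 0 + (l.length : Int) - ((l.length : Int) - leadT l.reverse - 1) =
            leadT l.reverse + 1 := by ring
        rw [hgap]
        split <;> omega
      · push_cast
        omega

theorem cmpT_short (l : List Int) (h : l.length ≤ 1) : cmpT l = [] := by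
  match l with
  | [] => rfl
  | [a] => rfl
  | a :: b :: r => simp at h

theorem cmpT_length (u : List Int) : (cmpT u).length = u.length - 1 := by
  match u with
  | [] => rfl
  | [a] => rfl
  | a :: b :: r =>
    simp only [cmpT, List.length_cons]
    rw [cmpT_length (b :: r)]
    simp only [List.length_cons]
    omega

-- comparison-table extraction: the mapped range IS cmpT (data.take n.toNat)
theorem map_range_cmp : ∀ (k : Nat) (l : List Int), k < l.length →
    (List.range k).map (fun j => decide (l.getD j 0 ≤ l.getD (j+1) 0)) = cmpT (l.take (k+1)) := by
  intro k
  induction k with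
  | zero =>
    intro l h
    match l with
    | [] => simp at h
    | a :: r => simp [cmpT_short]
  | succ k ih =>
    intro l h
    match l with
    | [] => simp at h
    | [a] => simp at h
    | a :: b :: r =>
      have := ih (b :: r) (by simpa using Nat.lt_of_succ_lt_succ h)
      rw [List.range_succ_eq_map, List.map_cons, List.map_map]
      simp only [List.take_succ_cons, cmpT]
      congr 1

theorem bridge (n : Int) (data : List Int) (h : Pre_max_sort n data) :
    (PySem.List.pyRange 0 (n-1) 1).map
        (fun i => decide (PySem.List.pyGetD data i 0 ≤ PySem.List.pyGetD data (i+1) 0)) =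
      cmpT (data.take n.toNat) := by
  rcases lt_or_ge n 2 with h2 | h2
  · rw [PySem.List.pyRange_one_eq_nil (by omega), List.map_nil]
    have hlen1 : (data.take n.toNat).length ≤ 1 := by
      have := List.length_take_le n.toNat data
      omega
    exact (cmpT_short _ hlen1).symm
  · have hlen : n ≤ (data.length : Int) := by
      rcases h with h | h
      · exact h
      · omega
    rw [PySem.List.pyRange_one, List.map_map]
    have hk : (n - 1 - 0).toNat < data.length := by omega
    have heq := map_range_cmp ((n - 1 - 0).toNat) data hk
    have hn : (n - 1 - 0).toNat + 1 = n.toNat := by omega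
    rw [hn] at heq
    rw [← heq]
    apply List.map_congr_left
    intro j _
    have c1 : ((0 : Int) + (j : Int)) = ((j : Nat) : Int) := by ring
    have c2 : ((j : Int) + 1) = (((j + 1 : Nat)) : Int) := by push_cast; ring
    simp only [Function.comp, c1, c2, PySem.List.pyGetD_natCast]

-- A's port, rewritten as a stepA fold over the comparison table
theorem portA_eq (n : Int) (data : List Int) (h : Pre_max_sort n data) :
    max_sort n data =
      (if ((cmpT (data.take n.toNat)).foldl stepA (0, 0)).2 >
          ((cmpT (data.take n.toNat)).foldl stepA (0, 0)).1
       then ((cmpT (data.take n.toNat)).foldl stepA (0, 0)).2 + 1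
       else ((cmpT (data.take n.toNat)).foldl stepA (0, 0)).1) := by
  have hfun : ∀ (s : Int × Int) (i : Int),
      (let c := s.2 + 1;
       if PySem.List.pyGetD data i 0 > PySem.List.pyGetD data (i+1) 0 then
         (if s.1 < c then c else s.1, 0)
       else (s.1, c)) =
      stepA s (decide (PySem.List.pyGetD data i 0 ≤ PySem.List.pyGetD data (i+1) 0)) := by
    intro s i
    by_cases hle : PySem.List.pyGetD data i 0 ≤ PySem.List.pyGetD data (i+1) 0
    · simp [stepA, hle, not_lt.mpr hle]
    · simp [stepA, hle, not_le.mp hle]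
  unfold max_sort
  rw [List.foldl_ext _ _ _ (fun s i _ => hfun s i), ← List.foldl_map, bridge n data h]

-- the range filter in B's port IS fPos of the comparison table
theorem filter_fPos : ∀ (m : Nat) (k : Int) (f g : Int → Bool), (∀ i, g i = !(f i)) →
    (PySem.List.pyRange k (k + (m : Int)) 1).filter g =
      fPos ((PySem.List.pyRange k (k + (m : Int)) 1).map f) k := by
  intro m
  induction m with
  | zero =>
    intro k f g _
    rw [PySem.List.pyRange_one_eq_nil (by omega)]
    rfl
  | succ m ih =>
    intro k f g h
    rw [PySem.List.pyRange_one_cons (by push_cast; omega)]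
    have hrest : k + ((m + 1 : Nat) : Int) = (k + 1) + (m : Int) := by push_cast; ring
    rw [hrest]
    simp only [List.filter_cons, List.map_cons, fPos, h k]
    cases hf : f k with
    | true =>
      simp only [Bool.not_true, if_true, Bool.false_eq_true, if_false]
      exact ih (k+1) f g h
    | false =>
      simp only [Bool.not_false, Bool.false_eq_true, if_false, if_true]
      rw [ih (k+1) f g h]

-- B's port, rewritten via mAr/leadT of the comparison table (the genuine-input case n ≥ 2)
theorem portB_eq (n : Int) (data : List Int) (h2 : 2 ≤ n) (hlen : n ≤ (data.length : Int)) :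
    max_sort_alt n data =
      (if leadT (cmpT (data.take n.toNat)).reverse + 1 > mAr (cmpT (data.take n.toNat)).reverse
       then leadT (cmpT (data.take n.toNat)).reverse + 1
       else mAr (cmpT (data.take n.toNat)).reverse) := by
  have hmap := bridge n data (Or.inl hlen)
  have hrange : PySem.List.pyRange 0 (n-1) 1 =
      PySem.List.pyRange 0 (0 + (((n-1).toNat : Nat) : Int)) 1 := by
    congr 1
    omega
  have hfilter : (PySem.List.pyRange 0 (n-1) 1).filter
      (fun i => decide (PySem.List.pyGetD data i 0 > PySem.List.pyGetD data (i+1) 0)) =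
      fPos (cmpT (data.take n.toNat)) 0 := by
    rw [← hmap, hrange]
    exact filter_fPos (n-1).toNat 0 _ _
      (fun i => by
        rw [← decide_not]
        exact decide_eq_decide.mpr (by omega))
  have hstep : (fun (s : Int × Int) (b : Int) =>
      (if b - s.2 > s.1 then b - s.2 else s.1, b)) = stepG := rfl
  have hlenL : ((cmpT (data.take n.toNat)).length : Int) = n - 1 := by
    rw [cmpT_length, List.length_take]
    omega
  have hgap : n - 1 - (((cmpT (data.take n.toNat)).length : Int) -
      leadT (cmpT (data.take n.toNat)).reverse - 1) =
      leadT (cmpT (data.take n.toNat)).reverse + 1 := by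
    rw [hlenL]
    ring
  unfold max_sort_alt
  rw [hfilter, hstep, List.foldl_append, invB, List.foldl_cons, List.foldl_nil]
  simp only [stepG, hgap]

-- A's value at n ≤ 1 (empty loop)
theorem A_small (n : Int) (data : List Int) (h : n ≤ 1) : max_sort n data = 0 := by
  unfold max_sort
  rw [PySem.List.pyRange_one_eq_nil (by omega)]
  norm_num

-- B's value at n ≤ 0 (only the sentinel gap, which is not positive)
theorem B_small (n : Int) (data : List Int) (h : n ≤ 0) : max_sort_alt n data = 0 := by
  unfold max_sort_alt
  rw [PySem.List.pyRange_one_eq_nil (by omega)]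
  simp only [List.filter_nil, List.nil_append, List.foldl_cons, List.foldl_nil]
  rw [if_neg (by omega : ¬ (n - 1 - (-1) > (0 : Int)))]

-- B's value at n = 1 (the single sentinel gap 0 - (-1) = 1)
theorem B_one (data : List Int) : max_sort_alt 1 data = 1 := by
  unfold max_sort_alt
  rw [PySem.List.pyRange_one_eq_nil (by omega)]
  norm_num

theorem cmpT_append2 : ∀ (w : List Int) (b a : Int),
    cmpT (w ++ [b, a]) = cmpT (w ++ [b]) ++ [decide (b ≤ a)]
  | [], b, a => by simp [cmpT]
  | [x], b, a => by simp [cmpT]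
  | x :: y :: r, b, a => by simpa [cmpT] using cmpT_append2 (y :: r) b a

def rle : Int → Int → Bool := fun a b => decide (a ≤ b)

theorem cmpT_snoc {u : List Int} (hu : u ≠ []) (x : Int) :
    cmpT (u ++ [x]) = cmpT u ++ [rle (u.getLast hu) x] := by
  conv_lhs => rw [← List.dropLast_append_getLast hu, List.append_assoc]
  rw [show [u.getLast hu] ++ [x] = [u.getLast hu, x] from rfl, cmpT_append2,
    List.dropLast_append_getLast hu, rle]

theorem spl_singleton (x : Int) : [x].splitBy rle = [[x]] :=
  List.splitBy_of_isChain (by simp) (List.isChain_singleton x)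

theorem spl_snoc_false {u : List Int} (hu : u ≠ []) {x : Int}
    (hx : rle (u.getLast hu) x = false) :
    (u ++ [x]).splitBy rle = u.splitBy rle ++ [[x]] := by
  rw [show (u ++ [x]) = u ++ x :: [] from rfl, List.splitBy_append_cons [] ?ha, spl_singleton]
  case ha =>
    intro y hy
    rw [List.getLast?_eq_some_getLast hu, Option.mem_some_iff] at hy
    exact hy ▸ hx

theorem spl_snoc_true {u : List Int} (hu : u ≠ []) {x : Int}
    (hx : rle (u.getLast hu) x = true) :
    (u ++ [x]).splitBy rle =
      (u.splitBy rle).dropLast ++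
        [(u.splitBy rle).getLast (List.splitBy_ne_nil.2 hu) ++ [x]] := by
  have hcne : u.splitBy rle ≠ [] := List.splitBy_ne_nil.2 hu
  have hglne : (u.splitBy rle).getLast hcne ≠ [] :=
    List.ne_nil_of_mem_splitBy (List.getLast_mem hcne)
  rw [List.splitBy_eq_iff]
  refine ⟨?_, ?_, ?_, ?_⟩
  · conv_lhs => rw [← List.flatten_splitBy rle u]
    conv_lhs => rw [← List.dropLast_append_getLast hcne]
    simp [List.flatten_append, List.append_assoc]
  · intro hmem
    rcases List.mem_append.mp hmem with h | h
    · exact List.nil_notMem_splitBy rle u (List.dropLast_subset _ h)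
    · simp at h
  · intro m hm
    rcases List.mem_append.mp hm with h | h
    · exact List.isChain_of_mem_splitBy (List.dropLast_subset _ h)
    · rw [List.mem_singleton.mp h, List.isChain_append]
      refine ⟨List.isChain_of_mem_splitBy (List.getLast_mem hcne),
        List.isChain_singleton x, ?_⟩
      intro p hp q hq
      rw [List.getLast?_eq_some_getLast hglne, Option.mem_some_iff] at hp
      simp only [List.head?_cons, Option.mem_some_iff] at hq
      subst hp; subst hq
      rw [List.getLast_getLast_splitBy rle hu]
      exact hx
  · have horig := List.isChain_getLast_head_splitBy rle u
    conv at horig => rw [← List.dropLast_append_getLast hcne]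
    rw [List.isChain_append] at horig ⊢
    obtain ⟨h1, _, h3⟩ := horig
    refine ⟨h1, List.isChain_singleton _, ?_⟩
    intro p hp q hq
    simp only [List.head?_cons, Option.mem_some_iff] at hq
    obtain ⟨ha, hb, hr⟩ := h3 p hp ((u.splitBy rle).getLast hcne) (by simp)
    subst hq
    refine ⟨ha, by simp, ?_⟩
    rwa [List.head_append_of_ne_nil hb]

theorem foldr_max_append (A : List Nat) (v : Nat) :
    (A ++ [v]).foldr max 0 = max (A.foldr max 0) v := by
  induction A with
  | nil => simp
  | cons a A ih => simp [ih]

-- the three splitBy quantities D_ is stated with, against leadT/mAr of the comparison table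
theorem key (u : List Int) :
    (2 ≤ (u.splitBy rle).length ↔ false ∈ cmpT u) ∧
    (u ≠ [] → ((((u.splitBy rle).getLast?.getD []).length : Nat) : Int) =
      leadT (cmpT u).reverse + 1) ∧
    (false ∈ cmpT u → ((((u.splitBy rle).dropLast.map List.length).foldr max 0 : Nat) : Int) =
      mAr (cmpT u).reverse) := by
  induction u using List.reverseRecOn with
  | nil => simp [cmpT]
  | append_singleton u x ih =>
    by_cases hu : u = []
    · subst hu
      simp [spl_singleton, cmpT, leadT]
    · obtain ⟨k1, k2, k3⟩ := ih
      have hcne : u.splitBy rle ≠ [] := List.splitBy_ne_nil.2 hu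
      have hC := cmpT_snoc hu x
      have ht0 := leadT_nonneg (cmpT u).reverse
      have h2 := k2 hu
      rw [List.getLast?_eq_some_getLast hcne, Option.getD_some] at h2
      cases hx : rle (u.getLast hu) x with
      | true =>
        have hs := spl_snoc_true hu hx
        rw [hx] at hC
        have hlen : ((u.splitBy rle).dropLast ++
            [(u.splitBy rle).getLast hcne ++ [x]]).length = (u.splitBy rle).length := by
          conv_rhs => rw [← List.dropLast_append_getLast hcne]
          simp
        refine ⟨?_, fun _ => ?_, fun hmem => ?_⟩
        · rw [hs, hC, hlen]
          simpa using k1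
        · rw [hs, hC, leadT_snoc]
          simp only [if_true]
          rw [List.getLast?_concat, Option.getD_some, List.length_append, List.length_singleton]
          omega
        · rw [hC] at hmem
          have hmem' : false ∈ cmpT u := by simpa using hmem
          rw [hs, hC, mAr_snoc]
          simp only [if_true]
          rw [List.dropLast_concat]
          exact k3 hmem'
      | false =>
        have hs := spl_snoc_false hu hx
        rw [hx] at hC
        have hpos : 1 ≤ (u.splitBy rle).length := List.length_pos_of_ne_nil hcne
        refine ⟨?_, fun _ => ?_, fun _ => ?_⟩
        · rw [hs, hC, List.length_append]
          simp only [List.length_cons, List.length_nil]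
          constructor
          · intro _
            simp
          · intro _
            omega
        · rw [hs, hC, leadT_snoc]
          simp
        · rw [hs, hC, mAr_snoc]
          simp only [Bool.false_eq_true, if_false]
          rw [List.dropLast_concat]
          conv_lhs => rw [← List.dropLast_append_getLast hcne]
          rw [List.map_append, List.map_cons, List.map_nil, foldr_max_append]
          by_cases hmem : false ∈ cmpT u
          · have h3 := k3 hmem
            push_cast
            push_cast at h3 h2
            omega
          · have hz : mAr (cmpT u).reverse = 0 := mAr_eq_zero _ (by simpa using hmem)
            have hdl : (u.splitBy rle).dropLast = [] := by
              have hlen2 : ¬ 2 ≤ (u.splitBy rle).length := fun h => hmem (k1.mp h)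
              have hone : (u.splitBy rle).length = 1 := by omega
              rw [← List.length_eq_zero_iff, List.length_dropLast, hone]
            rw [hdl]
            simp only [List.map_nil, List.foldr_nil, Nat.zero_max]
            omega

theorem D_iff (n : Int) (data : List Int) :
    D_max_sort n data ↔
      (n = 1 ∨ (false ∈ cmpT (data.take n.toNat) ∧
        leadT (cmpT (data.take n.toNat)).reverse = mAr (cmpT (data.take n.toNat)).reverse)) := by
  obtain ⟨k1, k2, k3⟩ := key (data.take n.toNat)
  unfold D_max_sort
  rw [show (fun a b => decide (a ≤ b)) = rle from rfl]
  apply or_congr_right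
  by_cases hu : data.take n.toNat = []
  · rw [hu]
    simp [cmpT]
  · have hcne : (data.take n.toNat).splitBy rle ≠ [] := List.splitBy_ne_nil.2 hu
    have h2 := k2 hu
    rw [List.getLast?_eq_some_getLast hcne, Option.getD_some] at h2
    simp only [List.length_map, List.getLast?_map, List.getLast?_eq_some_getLast hcne,
      Option.map_some, Option.getD_some, ← List.map_dropLast]
    constructor
    · rintro ⟨h1a, h2a⟩
      have hmem := k1.mp h1a
      have e3 := k3 hmem
      exact ⟨hmem, by omega⟩
    · rintro ⟨hmem, heq⟩
      have e3 := k3 hmem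
      exact ⟨k1.mpr hmem, by omega⟩

-- A and B over an arbitrary nonempty comparison table, outside the change region
theorem core (l : List Bool) (hnil : l ≠ [])
    (hnd : ¬ (false ∈ l ∧ leadT l.reverse = mAr l.reverse)) :
    (if (l.foldl stepA (0, 0)).2 > (l.foldl stepA (0, 0)).1
     then (l.foldl stepA (0, 0)).2 + 1 else (l.foldl stepA (0, 0)).1) =
      (if leadT l.reverse + 1 > mAr l.reverse then leadT l.reverse + 1 else mAr l.reverse) := by
  obtain ⟨hA, hm, hf, hne⟩ := inv l
  have ht0 := leadT_nonneg l.reverse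
  rw [hA]
  dsimp only
  by_cases hfl : false ∈ l
  · have h1 := hf.mp hfl
    have hne2 : leadT l.reverse ≠ mAr l.reverse := fun hc => hnd ⟨hfl, hc⟩
    split_ifs <;> omega
  · have h0 : 1 ≤ leadT l.reverse := (hne hnil).resolve_left hfl
    have hm0 : mAr l.reverse = 0 := by
      have := mt hf.mpr hfl
      omega
    split_ifs <;> omega

-- A and B over an arbitrary comparison table, inside the (non-n=1) change region
theorem core_ne (l : List Bool) (hfl : false ∈ l)
    (heq : leadT l.reverse = mAr l.reverse) :
    (if (l.foldl stepA (0, 0)).2 > (l.foldl stepA (0, 0)).1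
     then (l.foldl stepA (0, 0)).2 + 1 else (l.foldl stepA (0, 0)).1) ≠
      (if leadT l.reverse + 1 > mAr l.reverse then leadT l.reverse + 1 else mAr l.reverse) := by
  obtain ⟨hA, hm, hf, hne⟩ := inv l
  have ht0 := leadT_nonneg l.reverse
  have h1 := hf.mp hfl
  rw [hA]
  dsimp only
  split_ifs <;> omega

theorem cmpT_take_ne_nil (n : Int) (data : List Int) (h2 : 2 ≤ n)
    (hlen : n ≤ (data.length : Int)) : cmpT (data.take n.toNat) ≠ [] := by
  have hl := cmpT_length (data.take n.toNat)
  have ht : (data.take n.toNat).length = n.toNat := by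
    rw [List.length_take]
    omega
  intro hc
  rw [hc] at hl
  simp only [List.length_nil] at hl
  omega

-- ===== VERDICT (by name: the statement is the Claim_ definition above) =====
theorem max_sort_spec : Claim_unchanged_max_sort := by
  intro n data _ hpre hnd
  rw [D_iff n data] at hnd
  obtain ⟨h1, h2⟩ := not_or.mp hnd
  rcases lt_or_ge n 2 with hlt | hge
  · have hn0 : n ≤ 0 := by omega
    rw [A_small n data (by omega), B_small n data hn0]
  · have hlen : n ≤ (data.length : Int) := by
      rcases hpre with h | h
      · exact h
      · omega
    rw [portA_eq n data hpre, portB_eq n data hge hlen]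
    exact core _ (cmpT_take_ne_nil n data hge hlen) h2

theorem max_sort_changed : Claim_changed_max_sort := by
  unfold Claim_changed_max_sort; decide

theorem max_sort_tight : Claim_exact_max_sort := by
  intro n data _ hpre hd
  rw [D_iff n data] at hd
  rcases hd with h1 | ⟨hfl, heq⟩
  · subst h1
    rw [A_small 1 data (by omega), B_one data]
    omega
  · have hne := List.ne_nil_of_mem hfl
    have hn2 : 2 ≤ n := by
      have hl := cmpT_length (data.take n.toNat)
      have hpos : 0 < (cmpT (data.take n.toNat)).length := List.length_pos_of_ne_nil hne
      have hle := List.length_take_le n.toNat data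
      omega
    have hlen : n ≤ (data.length : Int) := by
      rcases hpre with h | h
      · exact h
      · omega
    rw [portA_eq n data hpre, portB_eq n data hn2 hlen]
    exact core_ne _ hfl heq
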